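-- pv_equiv track=rewrite | github.com/acutebar/projects | Black_Rhythm/crypt.py | prime_check_low
-- ===== SOURCE A (Python) =====
-- def prime_check_low(num, DEBUG=False):
--  prime = True
--  low_primes = [2, 3, 5, 7, 11, 13, 17, 19, 23, 29, 31, 37, 41, 43, 47, 53, 59, 61, 67, 71, 73, 79, 83, 89, 97, 101, 103, 107, 109, 113, 127, 131, 137, 139, 149, 151, 157, 163, 167, 173, 179, 181, 191, 193, 197, 199, 211, 223, 227, 229, 233, 239, 241, 251, 257, 263, 269, 271, 277, 281, 283, 293, 307, 311, 313, 317, 331, 337, 347, 349]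
--  for x in low_primes:
--    if num % x == 0:
--      prime = False
--      break
--  return prime
-- ===== SOURCE B (Python) =====
-- # Single-gcd test against the precomputed product of the 70 low primes,
-- # replacing A's scan over the prime list.
-- _LOW_PRIME_PRODUCT = 261546705642188677527611215060743478325487449257450867559845540208082579687704696223087912212929304531286298200244292923511657074872113330370
--
--
-- def prime_check_low(num, DEBUG=False):
--     a, b = abs(num), _LOW_PRIME_PRODUCT
--     while b:
--         a, b = b, a % b
--     return a == 1
-- ===== Notes on version B (the rewrite author's own statement) =====
-- stated objective: simpler
-- what changed: A scans the 70-prime list testing num % x == 0 for each; B takes a single Euclidean gcd of |num| with the precomputed product of those primes and tests whether it is 1.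
import Mathlib
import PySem

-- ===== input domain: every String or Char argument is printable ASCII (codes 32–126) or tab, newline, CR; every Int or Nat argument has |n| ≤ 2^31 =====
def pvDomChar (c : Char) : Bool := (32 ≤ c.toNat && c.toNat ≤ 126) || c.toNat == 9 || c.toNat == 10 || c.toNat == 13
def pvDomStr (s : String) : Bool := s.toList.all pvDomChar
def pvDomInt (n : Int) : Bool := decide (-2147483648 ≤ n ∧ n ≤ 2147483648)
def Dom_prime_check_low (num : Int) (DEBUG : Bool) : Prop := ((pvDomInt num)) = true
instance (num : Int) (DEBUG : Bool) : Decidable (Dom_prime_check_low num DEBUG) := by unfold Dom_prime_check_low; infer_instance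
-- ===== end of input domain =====

set_option maxRecDepth 4000


-- B replaces A's scan over the 70-prime list by one Euclidean gcd with their precomputed product (simpler, one loop over no list).

-- ===== PORT A =====
-- the literal low_primes list of A
def pvLowPrimes : List Int := [2, 3, 5, 7, 11, 13, 17, 19, 23, 29, 31, 37, 41, 43, 47, 53, 59, 61, 67, 71, 73, 79, 83, 89, 97, 101, 103, 107, 109, 113, 127, 131, 137, 139, 149, 151, 157, 163, 167, 173, 179, 181, 191, 193, 197, 199, 211, 223, 227, 229, 233, 239, 241, 251, 257, 263, 269, 271, 277, 281, 283, 293, 307, 311, 313, 317, 331, 337, 347, 349]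

-- the for-loop with break: returns false at the first x with num % x == 0
def pvLoopA (num : Int) : List Int → Bool
  | [] => true
  | x :: xs => if PySem.Int.mod num x = 0 then false else pvLoopA num xs

def prime_check_low (num : Int) (DEBUG : Bool) : Bool := pvLoopA num pvLowPrimes

-- ===== PORT B =====
def pvLowPrimeProduct : Int := 261546705642188677527611215060743478325487449257450867559845540208082579687704696223087912212929304531286298200244292923511657074872113330370

-- the `while b: a, b = b, a % b` Euclid loop of Source B
def pvGcdLoop (a b : Int) : Int :=
  if hb : b = 0 then a else pvGcdLoop b (PySem.Int.mod a b)
termination_by b.natAbs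
decreasing_by
  rcases lt_trichotomy b 0 with h | h | h
  · have := PySem.Int.mod_neg_bounds a h; omega
  · exact absurd h hb
  · have h1 := PySem.Int.mod_nonneg a h; have h2 := PySem.Int.mod_lt a h; omega

def prime_check_low_alt (num : Int) (DEBUG : Bool) : Bool :=
  pvGcdLoop |num| pvLowPrimeProduct = 1

-- ===== PRECONDITION & SPEC =====
def Spec_prime_check_low (num : Int) (DEBUG : Bool) (out : Bool) : Prop := out = prime_check_low_alt num DEBUG
instance (num : Int) (DEBUG : Bool) (out : Bool) : Decidable (Spec_prime_check_low num DEBUG out) := by unfold Spec_prime_check_low; infer_instance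

-- ===== CLAIM (what is proved, stated in full; the proofs are below) =====
def Claim_equal_prime_check_low : Prop := ∀ (num : Int) (DEBUG : Bool), Dom_prime_check_low num DEBUG → Spec_prime_check_low num DEBUG (prime_check_low num DEBUG)

-- ===== LEMMAS AND PROOFS =====

-- the Nat version of A's prime list
def pvLowPrimesN : List Nat := [2, 3, 5, 7, 11, 13, 17, 19, 23, 29, 31, 37, 41, 43, 47, 53, 59, 61, 67, 71, 73, 79, 83, 89, 97, 101, 103, 107, 109, 113, 127, 131, 137, 139, 149, 151, 157, 163, 167, 173, 179, 181, 191, 193, 197, 199, 211, 223, 227, 229, 233, 239, 241, 251, 257, 263, 269, 271, 277, 281, 283, 293, 307, 311, 313, 317, 331, 337, 347, 349]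

theorem pvLowPrimes_map : pvLowPrimes = pvLowPrimesN.map (Int.ofNat) := by rfl

theorem pvLowPrimesN_prime : ∀ p ∈ pvLowPrimesN, Nat.Prime p := by decide

theorem pvProduct_eq : pvLowPrimeProduct.natAbs = pvLowPrimesN.prod := by norm_num [pvLowPrimeProduct, pvLowPrimesN]

-- A's loop returns true iff no listed x divides num
theorem pvLoopA_iff (num : Int) (l : List Int) :
    pvLoopA num l = true ↔ ∀ x ∈ l, ¬ x ∣ num := by
  induction l with
  | nil => simp [pvLoopA]
  | cons x xs ih =>
    simp only [pvLoopA, List.mem_cons]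
    split_ifs with h
    · rw [PySem.Int.mod_eq_zero_iff_dvd] at h
      simp only [false_iff]; push_neg; exact ⟨x, Or.inl rfl, h⟩
    · rw [PySem.Int.mod_eq_zero_iff_dvd] at h
      rw [ih]; constructor
      · rintro hall y (rfl | hy); exact h; exact hall y hy
      · intro hall y hy; exact hall y (Or.inr hy)

-- B's loop is Int.gcd on nonneg inputs
theorem pvGcdLoop_eq (a b : Int) : 0 ≤ a → 0 ≤ b → pvGcdLoop a b = (Int.gcd a b : Int) := by
  induction a, b using pvGcdLoop.induct with
  | case1 a =>
    intro ha _
    rw [pvGcdLoop, dif_pos rfl, Int.gcd_zero_right]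
    omega
  | case2 a b hb ih =>
    intro ha hb0
    have hbpos : 0 < b := lt_of_le_of_ne hb0 (Ne.symm hb)
    have hmod : PySem.Int.mod a b = a % b := PySem.Int.mod_eq_emod_of_pos hbpos
    rw [pvGcdLoop, dif_neg hb, ih hb0 (by rw [hmod]; exact Int.emod_nonneg a hb)]
    congr 1
    lift a to ℕ using ha
    lift b to ℕ using hb0
    rw [hmod]
    rw [show ((a:Int) % (b:Int)) = ((a % b : Nat) : Int) from by push_cast; rfl]
    simp only [Int.gcd_natCast_natCast]
    rw [Nat.gcd_comm a b, Nat.gcd_rec b a, Nat.gcd_comm]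

-- coprimality with a product of primes = divisible by none of them
theorem pvCoprimeList (n : Nat) (l : List Nat) (hp : ∀ p ∈ l, Nat.Prime p) :
    Nat.Coprime n l.prod ↔ ∀ p ∈ l, ¬ p ∣ n := by
  induction l with
  | nil => simp [Nat.Coprime]
  | cons x xs ih =>
    simp only [List.prod_cons, Nat.coprime_mul_iff_right, List.mem_cons]
    rw [ih (fun p h => hp p (List.mem_cons_of_mem x h))]
    have hx : Nat.Coprime n x ↔ ¬ x ∣ n := by
      rw [Nat.coprime_comm]
      exact (hp x (List.mem_cons_self)).coprime_iff_not_dvd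
    constructor
    · rintro ⟨h1, h2⟩ p (rfl | hm); exact hx.mp h1; exact h2 p hm
    · intro h; exact ⟨hx.mpr (h x (Or.inl rfl)), fun p hm => h p (Or.inr hm)⟩

theorem prime_check_low_spec : Claim_equal_prime_check_low := by
  intro num DEBUG _
  unfold Spec_prime_check_low prime_check_low prime_check_low_alt
  have hPpos : (0:Int) ≤ pvLowPrimeProduct := by norm_num [pvLowPrimeProduct]
  rw [Bool.eq_iff_iff]
  rw [pvLoopA_iff, decide_eq_true_eq]
  rw [pvGcdLoop_eq _ _ (abs_nonneg num) hPpos]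
  have hgcd : Int.gcd |num| pvLowPrimeProduct = Nat.gcd num.natAbs pvLowPrimesN.prod := by
    rw [Int.gcd, Int.natAbs_abs, pvProduct_eq]
  constructor
  · intro h
    rw [hgcd]
    have : Nat.Coprime num.natAbs pvLowPrimesN.prod := by
      rw [pvCoprimeList _ _ pvLowPrimesN_prime]
      intro p hm hdvd
      refine h (Int.ofNat p) ?_ ?_
      · rw [pvLowPrimes_map]; exact List.mem_map_of_mem hm
      · rw [← Int.natAbs_dvd_natAbs]; simpa using hdvd
    exact_mod_cast this
  · intro h x hx hdvd
    rw [hgcd] at h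
    have hc : Nat.Coprime num.natAbs pvLowPrimesN.prod := by exact_mod_cast h
    rw [pvCoprimeList _ _ pvLowPrimesN_prime] at hc
    rw [pvLowPrimes_map] at hx
    obtain ⟨p, hm, rfl⟩ := List.mem_map.mp hx
    exact hc p hm (by rw [← Int.natAbs_dvd_natAbs] at hdvd; simpa using hdvd)
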